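-- pv_equiv track=rewrite | github.com/eprj453/ALGORITHM | 프로그래머스(자료구조, 코딩테스트)/실전대비모의고사/1차/2.py | solution
-- ===== SOURCE A (Python) =====
-- def solution(want, number, discount):
-- 	answer = 0
-- 	want_dict = {k: v for k, v in zip(want, number)}
--
-- 	compare_dict = dict()
-- 	for k in discount[:10]:
-- 		compare_dict[k] = compare_dict.get(k, 0) + 1
--
-- 	if want_dict == compare_dict:
-- 		answer += 1
--
-- 	for i in range(10, len(discount)):
-- 		item = discount[i]
-- 		before_item = discount[i - 10]
--
-- 		compare_dict[item] = compare_dict.get(item, 0) + 1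
-- 		if compare_dict.get(before_item):
-- 			compare_dict[before_item] = compare_dict[before_item] - 1
--
-- 			if compare_dict[before_item] == 0:
-- 				del compare_dict[before_item]
--
-- 		if want_dict == compare_dict:
-- 			answer += 1
--
-- 	return answer
-- ===== SOURCE B (Python) =====
-- def solution(want, number, discount):
--     target = {}
--     for k, v in zip(want, number):
--         target[k] = v
--     n = len(discount)
--     last = max(n - 10, 0)
--     answer = 0
--     for s in range(last + 1):
--         counts = {}
--         for x in discount[s:s + 10]:
--             counts[x] = counts.get(x, 0) + 1
--         if counts == target:
--             answer += 1
--     return answer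
-- ===== Notes on version B (the rewrite author's own statement) =====
-- stated objective: simpler
-- what changed: A maintains one sliding count-dict incrementally (insert the entering item, decrement/delete the leaving one) and compares it to the wanted dict at every step; B is stateless: for each window start it recounts the 10-item slice from scratch and compares, a two-line loop with no carried state.
import Mathlib
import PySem

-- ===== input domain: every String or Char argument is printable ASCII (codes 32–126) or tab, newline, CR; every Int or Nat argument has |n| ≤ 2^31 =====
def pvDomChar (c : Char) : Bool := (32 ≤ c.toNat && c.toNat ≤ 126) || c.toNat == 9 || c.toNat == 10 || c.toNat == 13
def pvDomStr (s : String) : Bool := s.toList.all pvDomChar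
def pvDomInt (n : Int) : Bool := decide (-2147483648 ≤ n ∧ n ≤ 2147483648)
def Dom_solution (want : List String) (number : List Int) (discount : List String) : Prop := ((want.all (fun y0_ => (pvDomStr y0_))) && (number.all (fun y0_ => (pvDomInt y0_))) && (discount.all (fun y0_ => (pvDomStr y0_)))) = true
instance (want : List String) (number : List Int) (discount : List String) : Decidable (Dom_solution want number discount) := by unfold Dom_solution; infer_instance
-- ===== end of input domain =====

-- B replaces A's incrementally maintained sliding-window dict with a stateless recount of each
-- 10-item window (objective: simpler — shorter and plainer; same return value, no speed claim).

-- ===== PORT A =====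

-- Python's `d1 == d2` on dicts: equal key sets and equal values (insertion order ignored).
-- Exact for dicts with duplicate-free key lists, which every dict built by Python dict operations has.
def pyDictEq (d1 d2 : PySem.Dict String Int) : Bool :=
  (d1.size == d2.size) && d1.items.all (fun p => d2.get? p.1 == some p.2)

-- Python truthiness of `d.get(k)`: None and 0 are falsy.
def pyTruthyOptInt (o : Option Int) : Bool :=
  match o with
  | none => false
  | some v => v != 0

-- the body of A's `for i in range(10, len(discount))` loop; state = (answer, compare_dict)
def solA_step (want_dict : PySem.Dict String Int) (discount : List String)
    (st : Int × PySem.Dict String Int) (i : Int) : Int × PySem.Dict String Int :=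
  let item := PySem.List.pyGetD discount i ""
  let before_item := PySem.List.pyGetD discount (i - 10) ""
  let cd := st.2.insert item (st.2.getD item 0 + 1)
  let cd :=
    if pyTruthyOptInt (cd.get? before_item) then
      let cd2 := cd.insert before_item (cd.getD before_item 0 - 1)
      if cd2.getD before_item 0 == 0 then cd2.erase before_item else cd2
    else cd
  (if pyDictEq want_dict cd then st.1 + 1 else st.1, cd)

def solution (want : List String) (number : List Int) (discount : List String) : Int :=
  let want_dict := (want.zip number).foldl (fun d p => d.insert p.1 p.2) PySem.Dict.empty
  let compare_dict := (PySem.List.slice discount none (some 10)).foldl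
      (fun d k => d.insert k (d.getD k 0 + 1)) PySem.Dict.empty
  let answer : Int := if pyDictEq want_dict compare_dict then 1 else 0
  ((PySem.List.pyRange 10 (discount.length : Int) 1).foldl
      (solA_step want_dict discount) (answer, compare_dict)).1

-- ===== PORT B =====

def solution_alt (want : List String) (number : List Int) (discount : List String) : Int :=
  let target := (want.zip number).foldl (fun d p => d.insert p.1 p.2) PySem.Dict.empty
  let n : Int := (discount.length : Int)
  let last : Int := max (n - 10) 0
  (PySem.List.pyRange 0 (last + 1) 1).foldl
    (fun answer s =>
      let counts := (PySem.List.slice discount (some s) (some (s + 10))).foldl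
          (fun d x => d.insert x (d.getD x 0 + 1)) PySem.Dict.empty
      if pyDictEq counts target then answer + 1 else answer)
    0

-- ===== PRECONDITION & SPEC =====
def Spec_solution (want : List String) (number : List Int) (discount : List String) (out : Int) : Prop := out = solution_alt want number discount
instance (want : List String) (number : List Int) (discount : List String) (out : Int) : Decidable (Spec_solution want number discount out) := by unfold Spec_solution; infer_instance

-- ===== CLAIM (what is proved, stated in full; the proofs are below) =====
def Claim_equal_solution : Prop := ∀ (want : List String) (number : List Int) (discount : List String), Dom_solution want number discount → Spec_solution want number discount (solution want number discount)

-- ===== LEMMAS AND PROOFS =====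

-- the length-10 window of `discount` starting at position s
def pvWin (discount : List String) (s : Nat) : List String := (discount.drop s).take 10

-- the dict part of A's loop body, with the two indexings already resolved to values a, b
def stepDict (cd : PySem.Dict String Int) (a b : String) : PySem.Dict String Int :=
  let cd1 := cd.insert a (cd.getD a 0 + 1)
  if pyTruthyOptInt (cd1.get? b) then
    let c := cd1.insert b (cd1.getD b 0 - 1)
    if c.getD b 0 == 0 then c.erase b else c
  else cd1

theorem find?_filter_ne (items : List (String × Int)) (k k' : String) (h : k' ≠ k) :
    (items.filter (fun p => !(p.1 == k))).find? (fun p => p.1 == k') =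
      items.find? (fun p => p.1 == k') := by
  have h3 : (k == k') = false := by
    simp only [beq_eq_false_iff_ne]; exact fun hh => h hh.symm
  induction items with
  | nil => simp
  | cons p rest ih =>
      by_cases hpk : p.1 = k
      · simp [hpk, h3, ih]
      · have h1 : (p.1 == k) = false := by simpa using hpk
        cases hq : (p.1 == k') <;>
          simp [h1, hq, ih]

theorem get?_erase (d : PySem.Dict String Int) (k k' : String) :
    (d.erase k).get? k' = if k' = k then none else d.get? k' := by
  by_cases h : k' = k
  · subst h
    simp only [PySem.Dict.erase, PySem.Dict.get?]
    rw [List.find?_filter]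
    rw [List.find?_eq_none.mpr (by intro x _; by_cases hx : x.1 = k' <;> simp [hx])]
    rfl
  · simp only [PySem.Dict.erase, PySem.Dict.get?, if_neg h]
    rw [find?_filter_ne _ _ _ h]

theorem nodup_keys_erase (d : PySem.Dict String Int) (k : String) (h : d.keys.Nodup) :
    (d.erase k).keys.Nodup := by
  have : (d.erase k).keys.Sublist d.keys :=
    List.Sublist.map _ List.filter_sublist
  exact h.sublist this

theorem get?_counter (xs : List String) (v : String) :
    (PySem.Dict.counter xs).get? v =
      if xs.count v = 0 then none else some (xs.count v : Int) := by
  have hc := PySem.Dict.contains_counter xs v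
  have hg := PySem.Dict.getD_counter xs v
  rw [PySem.Dict.getD_eq_get?_getD] at hg
  cases h : (PySem.Dict.counter xs).get? v with
  | none =>
      have : (PySem.Dict.counter xs).contains v = false :=
        (PySem.Dict.get?_eq_none_iff_contains _ _).mp h
      rw [this] at hc
      have hv : v ∉ xs := by simpa using hc.symm
      have : xs.count v = 0 := List.count_eq_zero.mpr hv
      simp [this]
  | some w =>
      have hct : (PySem.Dict.counter xs).contains v = true := by
        rw [PySem.Dict.contains_eq_isSome_get?, h]; rfl
      rw [hct] at hc
      have hv : v ∈ xs := by simpa using hc.symm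
      have hpos : xs.count v ≠ 0 := by
        have := List.count_pos_iff.mpr hv
        omega
      rw [h] at hg
      simp at hg
      simp [hpos, hg]

theorem keys_length (d : PySem.Dict String Int) : d.keys.length = d.size := by
  simp [PySem.Dict.keys, PySem.Dict.size]

theorem mem_keys_iff_isSome (d : PySem.Dict String Int) (k : String) :
    k ∈ d.keys ↔ (d.get? k).isSome := by
  rw [← PySem.Dict.contains_iff_mem_keys, PySem.Dict.contains_eq_isSome_get?]

theorem pyDictEq_iff (d1 d2 : PySem.Dict String Int)
    (h1 : d1.keys.Nodup) (h2 : d2.keys.Nodup) :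
    pyDictEq d1 d2 = true ↔ ∀ k, d1.get? k = d2.get? k := by
  constructor
  · rintro h
    simp only [pyDictEq, Bool.and_eq_true, beq_iff_eq, List.all_eq_true] at h
    obtain ⟨hsize, hall⟩ := h
    have hsub : d1.keys ⊆ d2.keys := by
      intro k hk
      rw [mem_keys_iff_isSome] at hk
      obtain ⟨v, hv⟩ := Option.isSome_iff_exists.mp hk
      have hm := PySem.Dict.mem_items_of_get?_eq_some d1 hv
      have := hall _ hm
      simp only [] at this
      rw [mem_keys_iff_isSome, this]; rfl
    have hperm : d1.keys.Perm d2.keys :=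
      (h1.subperm hsub).perm_of_length_le (by rw [keys_length, keys_length, hsize])
    intro k
    cases hv : d1.get? k with
    | some v =>
        have := hall _ (PySem.Dict.mem_items_of_get?_eq_some d1 hv)
        simp only [] at this
        rw [this]
    | none =>
        cases hw : d2.get? k with
        | none => rfl
        | some w =>
            exfalso
            have hk2 : k ∈ d2.keys := by
              rw [mem_keys_iff_isSome, hw]; rfl
            have hk1 : k ∈ d1.keys := hperm.mem_iff.mpr hk2
            rw [mem_keys_iff_isSome, hv] at hk1
            exact absurd hk1 (by simp)
  · intro h
    have hperm : d1.keys.Perm d2.keys := by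
      rw [List.perm_ext_iff_of_nodup h1 h2]
      intro k
      rw [mem_keys_iff_isSome, mem_keys_iff_isSome, h k]
    simp only [pyDictEq, Bool.and_eq_true, beq_iff_eq, List.all_eq_true]
    constructor
    · rw [← keys_length, ← keys_length]; exact hperm.length_eq
    · intro p hp
      have := PySem.Dict.get?_of_mem_items d1 hp h1
      rw [h p.1] at this
      simp [this]

theorem pyDictEq_congr (t d d' : PySem.Dict String Int)
    (h : ∀ k, d.get? k = d'.get? k) (hsz : d.size = d'.size) : pyDictEq t d = pyDictEq t d' := by
  have hb : (fun p : String × Int => d.get? p.1 == some p.2)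
      = (fun p => d'.get? p.1 == some p.2) := by
    funext p; rw [h p.1]
  simp only [pyDictEq, hsz, hb]

theorem pyDictEq_symm (d1 d2 : PySem.Dict String Int)
    (h1 : d1.keys.Nodup) (h2 : d2.keys.Nodup) :
    pyDictEq d1 d2 = pyDictEq d2 d1 := by
  rw [Bool.eq_iff_iff, pyDictEq_iff d1 d2 h1 h2, pyDictEq_iff d2 d1 h2 h1]
  constructor <;> intro h k <;> exact (h k).symm

theorem stepDict_get? (cd : PySem.Dict String Int) (a b : String) (t : List String)
    (hInv : ∀ k, cd.get? k = (PySem.Dict.counter (b :: t)).get? k) :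
    ∀ k, (stepDict cd a b).get? k = (PySem.Dict.counter (t ++ [a])).get? k := by
  intro k
  simp only [stepDict]
  have hsplit : ∀ x, (t ++ [a]).count x = t.count x + (if x = a then 1 else 0) := by
    intro x
    rw [List.count_append]
    by_cases hx : x = a
    · simp [hx]
    · simp [Ne.symm hx, hx]
  have hgetD : ∀ x, cd.getD x 0 = ((b :: t).count x : Int) := by
    intro x
    rw [PySem.Dict.getD_eq_get?_getD, hInv, get?_counter]
    split <;> simp_all
  have hget1 : ∀ x, (cd.insert a (cd.getD a 0 + 1)).get? x
      = if x = a then some (((b :: t).count a : Int) + 1) else cd.get? x := by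
    intro x
    rw [PySem.Dict.get?_insert, hgetD]
  have hguard : pyTruthyOptInt ((cd.insert a (cd.getD a 0 + 1)).get? b) = true := by
    rw [hget1]
    by_cases hba : b = a
    · simp [hba, pyTruthyOptInt]; omega
    · rw [if_neg hba, hInv, get?_counter]
      have hcb : (b :: t).count b = t.count b + 1 := by simp
      rw [hcb, if_neg (by omega)]
      simp [pyTruthyOptInt]; omega
  rw [hguard, if_pos rfl]
  have hgetDc : ((cd.insert a (cd.getD a 0 + 1)).insert b
        ((cd.insert a (cd.getD a 0 + 1)).getD b 0 - 1)).getD b 0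
      = (cd.insert a (cd.getD a 0 + 1)).getD b 0 - 1 := by
    rw [PySem.Dict.getD_insert, if_pos rfl]
  have hgetc : ∀ x, ((cd.insert a (cd.getD a 0 + 1)).insert b
        ((cd.insert a (cd.getD a 0 + 1)).getD b 0 - 1)).get? x
      = if x = b then some ((cd.insert a (cd.getD a 0 + 1)).getD b 0 - 1)
        else (cd.insert a (cd.getD a 0 + 1)).get? x := by
    intro x; rw [PySem.Dict.get?_insert]
  have hgetD1 : (cd.insert a (cd.getD a 0 + 1)).getD b 0
      = if b = a then ((b :: t).count a : Int) + 1 else ((b :: t).count b : Int) := by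
    rw [PySem.Dict.getD_eq_get?_getD, hget1]
    split
    · rfl
    · rw [← PySem.Dict.getD_eq_get?_getD, hgetD]
  by_cases hba : b = a
  · -- item = before_item: net count unchanged, entry stays (count ≥ 1)
    subst hba
    have hc1 : (b :: t).count b = t.count b + 1 := by simp
    have hcond : (((cd.insert b (cd.getD b 0 + 1)).insert b
          ((cd.insert b (cd.getD b 0 + 1)).getD b 0 - 1)).getD b 0 == 0) = false := by
      rw [hgetDc, hgetD1, if_pos rfl, hc1, beq_eq_false_iff_ne]
      push_cast; omega
    rw [hcond, if_neg (by simp)]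
    rw [hgetc]
    by_cases hk : k = b
    · subst hk
      rw [if_pos rfl, hgetD1, if_pos rfl, get?_counter, hsplit, if_pos rfl, hc1,
        if_neg (by omega)]
      congr 1
      omega
    · rw [if_neg hk, hget1, if_neg hk, hInv, get?_counter, get?_counter, hsplit,
        if_neg hk]
      have h1 : (b :: t).count k = t.count k := by simp [Ne.symm hk]
      rw [h1]
      simp
  · -- item ≠ before_item
    have hc0 : (b :: t).count b = t.count b + 1 := by simp
    by_cases hcb : t.count b = 0
    · -- count drops to zero: key deleted
      have hcond : (((cd.insert a (cd.getD a 0 + 1)).insert b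
            ((cd.insert a (cd.getD a 0 + 1)).getD b 0 - 1)).getD b 0 == 0) = true := by
        rw [hgetDc, hgetD1, if_neg hba, hc0, beq_iff_eq]
        push_cast; omega
      rw [hcond, if_pos rfl]
      rw [get?_erase]
      by_cases hk : k = b
      · subst hk
        rw [if_pos rfl, get?_counter, hsplit, if_neg hba]
        simp [hcb]
      · rw [if_neg hk, hgetc, if_neg hk, hget1]
        by_cases hka : k = a
        · subst hka
          rw [if_pos rfl, get?_counter, hsplit, if_pos rfl]
          have h4 : (b :: t).count k = t.count k := by
            simp [hba]
          rw [h4, if_neg (by omega)]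
          congr 1
        · rw [if_neg hka, hInv, get?_counter, get?_counter, hsplit, if_neg hka]
          have h1 : (b :: t).count k = t.count k := by simp [Ne.symm hk]
          rw [h1]
          simp
    · -- count stays positive: entry updated in place
      have hcond : (((cd.insert a (cd.getD a 0 + 1)).insert b
            ((cd.insert a (cd.getD a 0 + 1)).getD b 0 - 1)).getD b 0 == 0) = false := by
        rw [hgetDc, hgetD1, if_neg hba, hc0, beq_eq_false_iff_ne]
        push_cast; omega
      rw [hcond, if_neg (by simp)]
      rw [hgetc]
      by_cases hk : k = b
      · subst hk
        rw [if_pos rfl, hgetD1, if_neg hba, hc0, get?_counter, hsplit,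
          if_neg hba, if_neg (by omega)]
        congr 1
        omega
      · rw [if_neg hk, hget1]
        by_cases hka : k = a
        · subst hka
          rw [if_pos rfl, get?_counter, hsplit, if_pos rfl]
          have h4 : (b :: t).count k = t.count k := by
            simp [hba]
          rw [h4, if_neg (by omega)]
          congr 1
        · rw [if_neg hka, hInv, get?_counter, get?_counter, hsplit, if_neg hka]
          have h1 : (b :: t).count k = t.count k := by simp [Ne.symm hk]
          rw [h1]
          simp

theorem size_eq_of_get? (d d' : PySem.Dict String Int)
    (h1 : d.keys.Nodup) (h2 : d'.keys.Nodup) (h : ∀ k, d.get? k = d'.get? k) :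
    d.size = d'.size := by
  rw [← keys_length, ← keys_length]
  exact ((List.perm_ext_iff_of_nodup h1 h2).mpr (fun k => by
    rw [mem_keys_iff_isSome, mem_keys_iff_isSome, h k])).length_eq

theorem pyDictEq_congr' (t d d' : PySem.Dict String Int)
    (hd : d.keys.Nodup) (hd' : d'.keys.Nodup)
    (h : ∀ k, d.get? k = d'.get? k) : pyDictEq t d = pyDictEq t d' :=
  pyDictEq_congr t d d' h (size_eq_of_get? d d' hd hd' h)

theorem stepDict_nodup (cd : PySem.Dict String Int) (a b : String) (h : cd.keys.Nodup) :
    (stepDict cd a b).keys.Nodup := by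
  simp only [stepDict]
  split
  · split
    · exact nodup_keys_erase _ _
        (PySem.Dict.nodup_keys_insert _ _ _ (PySem.Dict.nodup_keys_insert _ _ _ h))
    · exact PySem.Dict.nodup_keys_insert _ _ _ (PySem.Dict.nodup_keys_insert _ _ _ h)
  · exact PySem.Dict.nodup_keys_insert _ _ _ h


theorem loopA (wd : PySem.Dict String Int) (discount : List String) :
    ∀ (m s : Nat) (ans : Int) (cd : PySem.Dict String Int),
      s + 10 + m = discount.length →
      cd.keys.Nodup →
      (∀ k, cd.get? k = (PySem.Dict.counter (pvWin discount s)).get? k) →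
      ((PySem.List.pyRange ((s : Int) + 10) (discount.length : Int) 1).foldl
          (solA_step wd discount) (ans, cd)).1
        = ans + (((List.range m).countP
            (fun j => pyDictEq wd (PySem.Dict.counter (pvWin discount (s + 1 + j))))) : Int) := by
  intro m
  induction m with
  | zero =>
      intro s ans cd hlen _ _
      rw [PySem.List.pyRange_one_eq_nil (by omega)]
      simp
  | succ m ih =>
      intro s ans cd hlen hnd hInv
      have hsb : ((s : Int) + 10) < (discount.length : Int) := by omega
      rw [PySem.List.pyRange_one_cons hsb, List.foldl_cons]
      have hslt : s < discount.length := by omega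
      have hs10 : s + 10 < discount.length := by omega
      set a := discount.getD (s + 10) "" with ha
      set b := discount.getD s "" with hb
      set t := (discount.drop (s + 1)).take 9 with ht
      have hwcons : pvWin discount s = b :: t := by
        rw [pvWin, List.drop_eq_getElem_cons hslt,
          show (10 : Nat) = 9 + 1 from rfl, List.take_succ_cons, hb,
          List.getD_eq_getElem discount "" hslt, ht]
      have hwnext : pvWin discount (s + 1) = t ++ [a] := by
        rw [pvWin, show (10 : Nat) = 9 + 1 from rfl, List.take_add_one, ← ht]
        congr 1
        rw [List.getElem?_drop,
          show s + 1 + 9 = s + 10 from by omega,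
          List.getElem?_eq_getElem hs10]
        rw [ha, List.getD_eq_getElem discount "" hs10]
        rfl
      have hia : PySem.List.pyGetD discount ((s : Int) + 10) "" = a := by
        rw [show ((s : Int) + 10) = (((s + 10 : Nat) : Int)) from by push_cast; ring,
          PySem.List.pyGetD_natCast]
      have hib : PySem.List.pyGetD discount ((s : Int) + 10 - 10) "" = b := by
        rw [show ((s : Int) + 10 - 10) = ((s : Nat) : Int) from by ring,
          PySem.List.pyGetD_natCast]
      have hpair : solA_step wd discount (ans, cd) ((s : Int) + 10)
          = (if pyDictEq wd (stepDict cd a b) then ans + 1 else ans, stepDict cd a b) := by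
        simp only [solA_step, stepDict, hia, hib]
      rw [hpair]
      have hInv' : ∀ k, cd.get? k = (PySem.Dict.counter (b :: t)).get? k := by
        rw [← hwcons]; exact hInv
      have hInv2 : ∀ k, (stepDict cd a b).get? k
          = (PySem.Dict.counter (pvWin discount (s + 1))).get? k := by
        rw [hwnext]; exact stepDict_get? cd a b t hInv'
      have hnd2 : (stepDict cd a b).keys.Nodup := stepDict_nodup cd a b hnd
      rw [show ((s : Int) + 10 + 1) = (((s + 1 : Nat) : Int) + 10) from by push_cast; ring]
      rw [ih (s + 1) _ _ (by omega) hnd2 hInv2]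
      have hQ : pyDictEq wd (stepDict cd a b)
          = pyDictEq wd (PySem.Dict.counter (pvWin discount (s + 1))) :=
        pyDictEq_congr' wd _ _ hnd2 (PySem.Dict.nodup_keys_counter _) hInv2
      rw [hQ]
      rw [List.range_succ_eq_map, List.countP_cons, List.countP_map]
      have hfun : ((fun j => pyDictEq wd (PySem.Dict.counter (pvWin discount (s + 1 + j)))) ∘ Nat.succ)
          = fun j => pyDictEq wd (PySem.Dict.counter (pvWin discount (s + 1 + 1 + j))) := by
        funext j
        rw [Function.comp_apply, show s + 1 + Nat.succ j = s + 1 + 1 + j from by omega]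
      rw [hfun]
      by_cases hq : pyDictEq wd (PySem.Dict.counter (pvWin discount (s + 1))) = true
      · simp only [hq, if_true]
        push_cast
        ring
      · rw [if_neg hq]
        simp only [Bool.not_eq_true] at hq
        rw [hq]
        simp

theorem solution_spec' : ∀ (want : List String) (number : List Int) (discount : List String),
    solution want number discount = solution_alt want number discount := by
  intro want number discount
  set wd := (want.zip number).foldl (fun d p => d.insert p.1 p.2) PySem.Dict.empty with hwd
  have hwdnd : wd.keys.Nodup := by
    rw [hwd]
    exact PySem.Dict.nodup_keys_foldl_insert_key (want.zip number) Prod.fst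
      (fun d p => p.2) PySem.Dict.empty (by simp [PySem.Dict.keys_empty])
  have hcnt0 : (PySem.List.slice discount none (some 10)).foldl
      (fun d k => d.insert k (d.getD k 0 + 1)) PySem.Dict.empty
      = PySem.Dict.counter (pvWin discount 0) := by
    rw [PySem.Dict.foldl_insert_getD_add_one_eq_counter,
      PySem.List.slice_to discount (show (0:Int) ≤ 10 by norm_num)]
    simp [pvWin]
  -- B evaluates to a window count
  have hsl : ∀ (j : Nat), PySem.List.slice discount (some (j : Int)) (some ((j : Int) + 10))
      = pvWin discount j := by
    intro j
    have h := PySem.List.slice_natCast_add discount j 10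
    norm_num at h
    rw [pvWin]
    exact h
  have hmax : max ((discount.length : Int) - 10) 0 = ((discount.length - 10 : Nat) : Int) := by
    rcases le_or_gt 10 discount.length with h | h
    · rw [Int.natCast_sub h]; omega
    · rw [show discount.length - 10 = 0 from by omega]; omega
  have hB : solution_alt want number discount
      = ((List.range (discount.length - 10 + 1)).countP
          (fun j => pyDictEq wd (PySem.Dict.counter (pvWin discount j))) : Int) := by
    show (PySem.List.pyRange 0 (max ((discount.length : Int) - 10) 0 + 1) 1).foldl _ 0 = _
    rw [hmax, show (((discount.length - 10 : Nat) : Int) + 1)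
      = ((discount.length - 10 + 1 : Nat) : Int) from by push_cast; ring]
    rw [PySem.List.pyRange_zero_nat, List.foldl_map]
    rw [PySem.List.foldl_count_if
      (fun j : Nat => pyDictEq ((PySem.List.slice discount (some (j : Int))
        (some ((j : Int) + 10))).foldl (fun d x => d.insert x (d.getD x 0 + 1))
        PySem.Dict.empty) wd)]
    simp only [PySem.Dict.foldl_insert_getD_add_one_eq_counter, hsl]
    have hsym : ∀ s : Nat, pyDictEq (PySem.Dict.counter (pvWin discount s)) wd
        = pyDictEq wd (PySem.Dict.counter (pvWin discount s)) := fun s =>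
      pyDictEq_symm _ _ (PySem.Dict.nodup_keys_counter _) hwdnd
    simp only [hsym]
    simp
  rw [hB]
  show ((PySem.List.pyRange 10 (discount.length : Int) 1).foldl
      (solA_step wd discount)
      ((if pyDictEq wd ((PySem.List.slice discount none (some 10)).foldl
          (fun d k => d.insert k (d.getD k 0 + 1)) PySem.Dict.empty) then (1:Int) else 0),
        (PySem.List.slice discount none (some 10)).foldl
          (fun d k => d.insert k (d.getD k 0 + 1)) PySem.Dict.empty)).1 = _
  rw [hcnt0]
  rcases le_or_gt 10 discount.length with hlen | hlen
  · rw [show (10 : Int) = (((0 : Nat) : Int) + 10) from by norm_num]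
    rw [loopA wd discount (discount.length - 10) 0 _ _ (by omega)
      (PySem.Dict.nodup_keys_counter _) (fun k => rfl)]
    rw [show discount.length - 10 + 1 = (discount.length - 10) + 1 from rfl,
      List.range_succ_eq_map, List.countP_cons, List.countP_map]
    have hfun : ((fun j => pyDictEq wd (PySem.Dict.counter (pvWin discount j))) ∘ Nat.succ)
        = fun j => pyDictEq wd (PySem.Dict.counter (pvWin discount (0 + 1 + j))) := by
      funext j
      rw [Function.comp_apply, show Nat.succ j = 0 + 1 + j from by omega]
    rw [hfun]
    by_cases hq : pyDictEq wd (PySem.Dict.counter (pvWin discount 0)) = true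
    · simp only [hq, if_true]
      push_cast; ring
    · rw [if_neg hq]
      simp only [Bool.not_eq_true] at hq
      rw [hq]
      simp
  · rw [PySem.List.pyRange_one_eq_nil (by omega : (discount.length : Int) ≤ 10)]
    rw [show discount.length - 10 = 0 from by omega]
    by_cases hq : pyDictEq wd (PySem.Dict.counter (pvWin discount 0)) = true
    · simp [hq]
    · simp only [Bool.not_eq_true] at hq
      simp [hq]

-- ===== VERDICT (by name: the statement is the Claim_ definition above) =====
theorem solution_spec : Claim_equal_solution := by
  intro want number discount _
  unfold Spec_solution
  exact solution_spec' want number discount
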